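-- pv_equiv track=rewrite | github.com/eunjuhyun88/myclosetai | backend/app/ai_pipeline/utils/graphonomy_checkpoint_system.py | _detect_checkpoint_type
-- ===== SOURCE A (Python) =====
-- from typing import Dict, Any, Optional, List, Tuple
--
-- def _detect_checkpoint_type(checkpoint_keys: List[str]) -> str:
--     """μ²΄ν¬ν¬μΈνΈ νƒ€μ… κ°μ§€"""
--     if any('module.' in key for key in checkpoint_keys):
--         return 'graphonomy_schp'  # Self-Correction Human Parsing
--     elif any('backbone.' in key for key in checkpoint_keys):
--         return 'graphonomy_resnet'
--     elif any('aspp.' in key for key in checkpoint_keys):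
--         return 'graphonomy_aspp'
--     elif any('self_correction' in key for key in checkpoint_keys):
--         return 'graphonomy_advanced'
--     else:
--         return 'graphonomy_standard'
-- ===== SOURCE B (Python) =====
-- def _detect_checkpoint_type(checkpoint_keys):
--     """Single pass over the keys recording which markers appear, then priority chain."""
--     has_module = has_backbone = has_aspp = has_sc = False
--     for key in checkpoint_keys:
--         if 'module.' in key:
--             has_module = True
--         if 'backbone.' in key:
--             has_backbone = True
--         if 'aspp.' in key:
--             has_aspp = True
--         if 'self_correction' in key:
--             has_sc = True
--     if has_module:
--         return 'graphonomy_schp'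
--     if has_backbone:
--         return 'graphonomy_resnet'
--     if has_aspp:
--         return 'graphonomy_aspp'
--     if has_sc:
--         return 'graphonomy_advanced'
--     return 'graphonomy_standard'
-- ===== Notes on version B (the rewrite author's own statement) =====
-- stated objective: alternative
-- what changed: Replaces four priority-ordered any() scans over the key list with a single pass that records which of the four markers occur, followed by the same priority chain on the recorded flags.
import Mathlib
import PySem

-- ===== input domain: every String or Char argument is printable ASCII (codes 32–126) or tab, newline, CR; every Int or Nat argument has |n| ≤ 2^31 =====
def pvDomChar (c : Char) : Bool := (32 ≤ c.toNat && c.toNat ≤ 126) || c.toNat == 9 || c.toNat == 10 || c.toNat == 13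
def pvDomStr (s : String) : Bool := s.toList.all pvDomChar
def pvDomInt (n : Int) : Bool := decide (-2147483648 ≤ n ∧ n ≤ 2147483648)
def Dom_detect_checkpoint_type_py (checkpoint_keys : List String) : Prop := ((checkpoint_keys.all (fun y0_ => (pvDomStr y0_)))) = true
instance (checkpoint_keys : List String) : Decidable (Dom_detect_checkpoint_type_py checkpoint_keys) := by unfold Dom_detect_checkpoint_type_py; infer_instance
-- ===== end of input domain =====

-- B replaces A's four priority-ordered any() scans with one pass recording marker flags,
-- then the same priority chain (objective: alternative decomposition, same cost).


-- ===== PORT A =====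
def detect_checkpoint_type_py (checkpoint_keys : List String) : String :=
  if checkpoint_keys.any (fun key => PySem.Str.isIn "module." key) then
    "graphonomy_schp"
  else if checkpoint_keys.any (fun key => PySem.Str.isIn "backbone." key) then
    "graphonomy_resnet"
  else if checkpoint_keys.any (fun key => PySem.Str.isIn "aspp." key) then
    "graphonomy_aspp"
  else if checkpoint_keys.any (fun key => PySem.Str.isIn "self_correction" key) then
    "graphonomy_advanced"
  else
    "graphonomy_standard"

-- ===== PORT B =====
-- single pass over the keys accumulating the four marker flags (Source B's loop)
def detect_checkpoint_type_py_alt (checkpoint_keys : List String) : String :=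
  let r := checkpoint_keys.foldl
    (fun (s : Bool × Bool × Bool × Bool) key =>
      ((if PySem.Str.isIn "module." key then true else s.1),
       (if PySem.Str.isIn "backbone." key then true else s.2.1),
       (if PySem.Str.isIn "aspp." key then true else s.2.2.1),
       (if PySem.Str.isIn "self_correction" key then true else s.2.2.2)))
    (false, false, false, false)
  if r.1 then "graphonomy_schp"
  else if r.2.1 then "graphonomy_resnet"
  else if r.2.2.1 then "graphonomy_aspp"
  else if r.2.2.2 then "graphonomy_advanced"
  else "graphonomy_standard"

-- ===== PRECONDITION & SPEC =====
def Spec_detect_checkpoint_type_py (checkpoint_keys : List String) (out : String) : Prop := out = detect_checkpoint_type_py_alt checkpoint_keys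
instance (checkpoint_keys : List String) (out : String) : Decidable (Spec_detect_checkpoint_type_py checkpoint_keys out) := by unfold Spec_detect_checkpoint_type_py; infer_instance

-- ===== CLAIM (what is proved, stated in full; the proofs are below) =====
def Claim_equal_detect_checkpoint_type_py : Prop := ∀ (checkpoint_keys : List String), Dom_detect_checkpoint_type_py checkpoint_keys → Spec_detect_checkpoint_type_py checkpoint_keys (detect_checkpoint_type_py checkpoint_keys)

-- ===== LEMMAS AND PROOFS =====
-- one loop step: setting a flag then OR-ing the remaining scan = OR-ing flag, head test and rest
theorem pv_or_step (c a r : Bool) : ((if c then true else a) || r) = (a || (c || r)) := by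
  cases c <;> cases a <;> simp

-- B's single fold computes exactly the four any-scans (with the initial flags OR-ed in).
theorem pv_fold_flags (ks : List String) (a b c d : Bool) :
    ks.foldl
      (fun (s : Bool × Bool × Bool × Bool) key =>
        ((if PySem.Str.isIn "module." key then true else s.1),
         (if PySem.Str.isIn "backbone." key then true else s.2.1),
         (if PySem.Str.isIn "aspp." key then true else s.2.2.1),
         (if PySem.Str.isIn "self_correction" key then true else s.2.2.2)))
      (a, b, c, d)
    = (a || ks.any (fun key => PySem.Str.isIn "module." key),
       b || ks.any (fun key => PySem.Str.isIn "backbone." key),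
       c || ks.any (fun key => PySem.Str.isIn "aspp." key),
       d || ks.any (fun key => PySem.Str.isIn "self_correction" key)) := by
  induction ks generalizing a b c d with
  | nil => simp
  | cons k ks ih =>
    simp only [List.foldl_cons, List.any_cons, ih, pv_or_step]

-- ===== VERDICT (by name: the statement is the Claim_ definition above) =====
theorem detect_checkpoint_type_py_spec : Claim_equal_detect_checkpoint_type_py := by
  intro ks _
  unfold Spec_detect_checkpoint_type_py detect_checkpoint_type_py detect_checkpoint_type_py_alt
  simp only [pv_fold_flags, Bool.false_or]
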